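-- pv_equiv track=rewrite | github.com/rcanaan/Functional-Programming-in-Python | תרגיל 4/ex4q2.py | treateline
-- ===== SOURCE A (Python) =====
-- def treateline(lineNr, line):
--     ln = line.split()
--
--     def rec(w, result):
--         if w == False:  # basic situation
--             return -1
--         if w == []:  # basic situation
--             return 1
--         else:  # recursion tail call
--             return rec(w[1:], result and isword(w))
--
--     if rec(ln, True) == -1:
--         return -1
--     else:  # to continue from here
--         ls = tuple([func(i) for i in ln])
--         return dict(zip(ln, ls))
--
-- def isword(wrd):  # returns true if all the letters in the word are letters
--     return all(i.isalpha() for i in wrd)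
--
-- def whatLetter(letter):
--     if letter == "a" or letter == "e" or letter == "i" or letter == "o" or letter == "u":
--         return -1
--     if ord(letter) >= 98 and ord(letter) <= 109:
--         return 0
--     else:
--         return 1
--
-- def func(wrd):
--     lst = list(wrd)
--
--     def rec(w, result1, result2, result3):
--         if w == []:  # basic situation
--             return (result1, result2, result3)
--         elif whatLetter(w[0]) == -1:  # general sitauation
--             return rec(w[1:], result1 + [w[0]], result2, result3)
--         elif whatLetter(w[0]) == 0:  # general sitauation
--             return rec(w[1:], result1, result2 + [w[0]], result3)
--         else:  # recursion tail call
--             return rec(w[1:], result1, result2, result3 + [w[0]])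
--
--     return rec(lst, [], [], [])
-- ===== SOURCE B (Python) =====
-- def treateline(lineNr, line):
--     # One pass per word with list appends (no O(n^2) recursive slicing),
--     # dict built directly while iterating the words once.
--     out = {}
--     for w in line.split():
--         if w not in out:
--             vowels, bm, other = [], [], []
--             for c in w:
--                 if c in "aeiou":
--                     vowels.append(c)
--                 elif "b" <= c <= "m":
--                     bm.append(c)
--                 else:
--                     other.append(c)
--             out[w] = (vowels, bm, other)
--     return out
-- ===== Notes on version B (the rewrite author's own statement) =====
-- stated objective: faster
-- what changed: Replaced the recursive slicing/concatenation passes (rec over w[1:] with list concatenation, plus a vacuous validity recursion and dict(zip(...)) over a rebuilt tuple) by one iterative pass per word with list appends, building the dict directly and skipping already-seen words.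
import Mathlib
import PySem

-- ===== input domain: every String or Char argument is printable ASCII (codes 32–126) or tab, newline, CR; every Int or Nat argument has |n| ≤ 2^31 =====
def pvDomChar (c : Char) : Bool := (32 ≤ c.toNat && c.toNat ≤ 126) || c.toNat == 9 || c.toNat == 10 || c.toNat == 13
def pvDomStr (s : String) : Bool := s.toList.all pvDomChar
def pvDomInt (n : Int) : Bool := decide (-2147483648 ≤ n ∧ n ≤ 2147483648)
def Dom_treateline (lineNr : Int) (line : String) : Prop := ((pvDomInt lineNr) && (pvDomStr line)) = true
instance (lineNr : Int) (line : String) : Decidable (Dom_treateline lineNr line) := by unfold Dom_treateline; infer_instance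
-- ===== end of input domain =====

-- B replaces A's recursive slicing/concatenation by one iterative pass per word with appends
-- (and builds the dict directly, skipping repeated words); objective: faster (asymptotic).

-- ===== PORT A =====

-- isword(wrd): all(i.isalpha() for i in wrd); A calls it on the LIST of words, so i are words
def iswordA (ws : List String) : Bool := ws.all (fun s => PySem.Str.strIsalpha s)

-- the outer rec(w, result): 'if w == False' is always False in Python for a list, so that
-- branch (-1) is unreachable and rec always returns 1
def recA : List String → Bool → Int
  | [], _ => 1
  | x :: t, result => recA t (result && iswordA (x :: t))

-- whatLetter(letter) on a single character
def whatLetterA (c : Char) : Int :=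
  if c = 'a' ∨ c = 'e' ∨ c = 'i' ∨ c = 'o' ∨ c = 'u' then -1
  else if 98 ≤ c.toNat ∧ c.toNat ≤ 109 then 0
  else 1

-- func's inner rec with the three accumulators (result as the 3-element list of lists)
def funcRecA : List Char → List String → List String → List String → List (List String)
  | [], r1, r2, r3 => [r1, r2, r3]
  | c :: w, r1, r2, r3 =>
    if whatLetterA c = -1 then funcRecA w (r1 ++ [String.ofList [c]]) r2 r3
    else if whatLetterA c = 0 then funcRecA w r1 (r2 ++ [String.ofList [c]]) r3
    else funcRecA w r1 r2 (r3 ++ [String.ofList [c]])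

def funcA (wrd : String) : List (List String) := funcRecA wrd.toList [] [] []

def treateline (lineNr : Int) (line : String) : List (String × List (List String)) :=
  let ln := PySem.Str.split₀ line
  if recA ln true = -1 then []   -- Python would return -1 here, but this branch is unreachable
  else
    let ls := ln.map funcA
    (PySem.Dict.ofList (ln.zip ls)).items

-- ===== PORT B =====

-- the inner for-loop over the characters of w, appending to the three lists
def partB (w : String) : List (List String) :=
  let t := w.toList.foldl
    (fun (acc : List String × List String × List String) c =>
      if c ∈ ['a', 'e', 'i', 'o', 'u'] then (acc.1 ++ [String.ofList [c]], acc.2.1, acc.2.2)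
      else if 'b' ≤ c ∧ c ≤ 'm' then (acc.1, acc.2.1 ++ [String.ofList [c]], acc.2.2)
      else (acc.1, acc.2.1, acc.2.2 ++ [String.ofList [c]]))
    ([], [], [])
  [t.1, t.2.1, t.2.2]

def treateline_alt (lineNr : Int) (line : String) : List (String × List (List String)) :=
  ((PySem.Str.split₀ line).foldl
    (fun (d : PySem.Dict String (List (List String))) w =>
      if d.contains w then d else d.insert w (partB w))
    PySem.Dict.empty).items

-- ===== PRECONDITION & SPEC =====
def Spec_treateline (lineNr : Int) (line : String) (out : List (String × List (List String))) : Prop := out = treateline_alt lineNr line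
instance (lineNr : Int) (line : String) (out : List (String × List (List String))) : Decidable (Spec_treateline lineNr line out) := by unfold Spec_treateline; infer_instance

-- ===== CLAIM (what is proved, stated in full; the proofs are below) =====
def Claim_equal_treateline : Prop := ∀ (lineNr : Int) (line : String), Dom_treateline lineNr line → Spec_treateline lineNr line (treateline lineNr line)

-- ===== LEMMAS AND PROOFS =====

-- A's outer rec ignores its boolean accumulator and always returns 1
theorem recA_eq_one (ws : List String) (b : Bool) : recA ws b = 1 := by
  induction ws generalizing b with
  | nil => rfl
  | cons x t ih => simpa [recA] using ih _

-- per character, A's three-way test and B's branch conditions coincide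
theorem funcRecA_eq_foldl (cs : List Char) (r1 r2 r3 : List String) :
    funcRecA cs r1 r2 r3 =
      (let t := cs.foldl
        (fun (acc : List String × List String × List String) c =>
          if c ∈ ['a', 'e', 'i', 'o', 'u'] then (acc.1 ++ [String.ofList [c]], acc.2.1, acc.2.2)
          else if 'b' ≤ c ∧ c ≤ 'm' then (acc.1, acc.2.1 ++ [String.ofList [c]], acc.2.2)
          else (acc.1, acc.2.1, acc.2.2 ++ [String.ofList [c]]))
        (r1, r2, r3)
       [t.1, t.2.1, t.2.2]) := by
  induction cs generalizing r1 r2 r3 with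
  | nil => rfl
  | cons c w ih =>
    have hbm : ('b' ≤ c ∧ c ≤ 'm') ↔ (98 ≤ c.toNat ∧ c.toNat ≤ 109) := by
      constructor
      · rintro ⟨h1, h2⟩
        exact ⟨Nat.le_of_lt_succ (Nat.lt_succ_of_le h1), Nat.le_of_lt_succ (Nat.lt_succ_of_le h2)⟩
      · rintro ⟨h1, h2⟩
        exact ⟨Char.le_def.mpr (by simpa using h1), Char.le_def.mpr (by simpa using h2)⟩
    by_cases hv : c = 'a' ∨ c = 'e' ∨ c = 'i' ∨ c = 'o' ∨ c = 'u'
    · simp [funcRecA, whatLetterA, hv, ih]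
    · by_cases hb : 98 ≤ c.toNat ∧ c.toNat ≤ 109
      · simp [funcRecA, whatLetterA, hv, hb, hbm, ih]
      · simp [funcRecA, whatLetterA, hv, hb, hbm, ih]

theorem funcA_eq_partB (w : String) : funcA w = partB w := by
  simpa [funcA, partB] using funcRecA_eq_foldl w.toList [] [] []

-- building dict(zip(ln, map f ln)) by unconditional insert equals B's skip-if-seen loop,
-- as long as every stored value is f of its key
theorem foldl_insert_eq_skip (f : String → List (List String)) (ln : List String)
    (d : PySem.Dict String (List (List String)))
    (hinv : ∀ p ∈ d.items, p.2 = f p.1) :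
    (ln.zip (ln.map f)).foldl (fun d p => d.insert p.1 p.2) d =
      ln.foldl (fun d w => if d.contains w then d else d.insert w (f w)) d := by
  induction ln generalizing d with
  | nil => rfl
  | cons x t ih =>
    simp only [List.map_cons, List.zip_cons_cons, List.foldl_cons]
    by_cases hc : d.contains x = true
    · have hins : d.insert x (f x) = d := by
        apply PySem.Dict.ext
        rw [PySem.Dict.items_insert_of_contains _ _ hc]
        have : d.items.map (fun p => if p.1 == x then (x, f x) else p) = d.items.map id := by
          refine List.map_congr_left (fun p hp => ?_)
          by_cases h : p.1 = x
          · have h2 := hinv p hp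
            cases p with
            | mk k v => simp_all
          · simp [h]
        rw [this, List.map_id]
      rw [if_pos hc, hins]
      exact ih d hinv
    · rw [if_neg hc]
      apply ih
      intro p hp
      rw [PySem.Dict.items_insert_of_not_contains _ _ (by simpa using hc)] at hp
      rcases List.mem_append.mp hp with h | h
      · exact hinv p h
      · simp only [List.mem_singleton] at h
        subst h
        rfl

-- ===== VERDICT (by name: the statement is the Claim_ definition above) =====
theorem treateline_spec : Claim_equal_treateline := by
  intro lineNr line _
  show treateline lineNr line = treateline_alt lineNr line
  unfold treateline treateline_alt
  simp only [recA_eq_one]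
  rw [if_neg (by norm_num)]
  have hmap : (PySem.Str.split₀ line).map funcA = (PySem.Str.split₀ line).map partB :=
    List.map_congr_left (fun w _ => funcA_eq_partB w)
  rw [hmap]
  rw [show PySem.Dict.ofList ((PySem.Str.split₀ line).zip ((PySem.Str.split₀ line).map partB)) =
        ((PySem.Str.split₀ line).zip ((PySem.Str.split₀ line).map partB)).foldl
          (fun d p => d.insert p.1 p.2) PySem.Dict.empty from rfl]
  rw [foldl_insert_eq_skip partB _ PySem.Dict.empty (by intro p hp; simp [PySem.Dict.empty] at hp)]
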